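-- pv_equiv track=rewrite | github.com/birbalin25/ADF2DB_migrator | notebooks/03_adf_code_converter.py | merge_component_data
-- ===== SOURCE A (Python) =====
-- def merge_component_data(mapping_rows: list, dep_rows: list) -> list:
--     """Join Component_Mapping and Dependency_Analysis by (factory_name, component_name).
--
--     Activities, Parameters, and Variables inherit their parent pipeline's phase/unit
--     data if no direct match exists.
--     """
--     dep_index = {}
--     for d in dep_rows:
--         key = (d.get("data_factory_name", ""), d.get("component_name", ""))
--         dep_index[key] = d
--
--     merged = []
--     for m in mapping_rows:
--         factory = m.get("data_factory_name", "")
--         name = m.get("adf_component_name", "")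
--         dep = dep_index.get((factory, name), {})
--
--         # If no dep data and this is a child component, inherit from parent
--         if not dep and m.get("parent_component", ""):
--             parent_name = m["parent_component"].split("/")[0]
--             dep = dep_index.get((factory, parent_name), {})
--
--         merged.append({
--             # From Component_Mapping
--             "data_factory_name": factory,
--             "adf_component_type": m.get("adf_component_type", ""),
--             "adf_component_name": name,
--             "adf_subtype": m.get("adf_subtype", ""),
--             "parent_component": m.get("parent_component", ""),
--             "databricks_equivalent": m.get("databricks_equivalent", ""),
--             "complexity_score": m.get("complexity_score", "Low"),
--             "adf_config_summary": m.get("adf_config_summary", ""),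
--             "key_metrics": m.get("key_metrics", "{}"),
--             # From Dependency_Analysis
--             "migration_phase": dep.get("migration_phase", ""),
--             "migration_unit_id": dep.get("migration_unit_id", ""),
--             "migration_unit_name": dep.get("migration_unit_name", ""),
--             "depends_on": dep.get("depends_on", ""),
--             "depended_on_by": dep.get("depended_on_by", ""),
--             "migration_unit_phase_plan": dep.get("migration_unit_phase_plan", ""),
--         })
--     return merged
-- ===== SOURCE B (Python) =====
-- def merge_component_data(mapping_rows: list, dep_rows: list) -> list:
--     """Join Component_Mapping and Dependency_Analysis by (factory_name, component_name).
--
--     Inverted join: record which mapping rows subscribe to each dependency key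
--     (directly and via their parent pipeline), then scan dep_rows once,
--     delivering each dependency row to its subscribers; later rows for the same
--     key override earlier ones.
--     """
--     direct_want = {}
--     parent_want = {}
--     for i, m in enumerate(mapping_rows):
--         factory = m.get("data_factory_name", "")
--         direct_want.setdefault((factory, m.get("adf_component_name", "")), []).append(i)
--         parent = m.get("parent_component", "")
--         if parent:
--             parent_want.setdefault((factory, parent.split("/")[0]), []).append(i)
--
--     direct_hit = {}
--     parent_hit = {}
--     for d in dep_rows:
--         key = (d.get("data_factory_name", ""), d.get("component_name", ""))
--         for i in direct_want.get(key, []):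
--             direct_hit[i] = d
--         for i in parent_want.get(key, []):
--             parent_hit[i] = d
--
--     merged = []
--     for i, m in enumerate(mapping_rows):
--         dep = direct_hit.get(i, {})
--         if not dep and m.get("parent_component", ""):
--             dep = parent_hit.get(i, {})
--         merged.append({
--             "data_factory_name": m.get("data_factory_name", ""),
--             "adf_component_type": m.get("adf_component_type", ""),
--             "adf_component_name": m.get("adf_component_name", ""),
--             "adf_subtype": m.get("adf_subtype", ""),
--             "parent_component": m.get("parent_component", ""),
--             "databricks_equivalent": m.get("databricks_equivalent", ""),
--             "complexity_score": m.get("complexity_score", "Low"),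
--             "adf_config_summary": m.get("adf_config_summary", ""),
--             "key_metrics": m.get("key_metrics", "{}"),
--             "migration_phase": dep.get("migration_phase", ""),
--             "migration_unit_id": dep.get("migration_unit_id", ""),
--             "migration_unit_name": dep.get("migration_unit_name", ""),
--             "depends_on": dep.get("depends_on", ""),
--             "depended_on_by": dep.get("depended_on_by", ""),
--             "migration_unit_phase_plan": dep.get("migration_unit_phase_plan", ""),
--         })
--     return merged
-- ===== Notes on version B (the rewrite author's own statement) =====
-- stated objective: alternative
-- what changed: Inverts the join: instead of indexing dep_rows by key and looking up per mapping row, B builds an inverted index from each dependency key to the mapping-row indices that subscribe to it (directly and via parent pipeline), then makes one scatter pass over dep_rows delivering each row to its subscribers, and a final pass assembling the output.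
import Mathlib
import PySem

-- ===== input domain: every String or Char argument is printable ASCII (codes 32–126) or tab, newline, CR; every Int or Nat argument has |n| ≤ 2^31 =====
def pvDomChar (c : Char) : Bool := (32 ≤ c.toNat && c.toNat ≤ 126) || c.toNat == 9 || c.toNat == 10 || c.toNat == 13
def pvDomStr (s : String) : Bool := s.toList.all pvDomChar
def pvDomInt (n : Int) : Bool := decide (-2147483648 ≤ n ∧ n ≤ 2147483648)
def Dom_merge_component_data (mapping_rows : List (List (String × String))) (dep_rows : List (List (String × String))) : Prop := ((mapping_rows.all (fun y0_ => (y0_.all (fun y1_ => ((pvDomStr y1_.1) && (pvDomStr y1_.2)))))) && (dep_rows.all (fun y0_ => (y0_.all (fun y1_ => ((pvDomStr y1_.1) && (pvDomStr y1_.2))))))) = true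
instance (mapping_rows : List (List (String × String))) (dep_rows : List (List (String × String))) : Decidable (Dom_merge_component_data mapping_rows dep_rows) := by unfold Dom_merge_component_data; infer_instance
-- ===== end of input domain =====

-- B inverts the join: an index from dependency keys to the mapping-row indices demanding them,
-- then a single scatter pass over dep_rows (same return value; alternative structure, not faster).

-- ===== PORT A =====

-- d.get(k, dflt) on a row dict (assoc list, first match = unique-key dict lookup)
def pvRowGetD (row : List (String × String)) (k d : String) : String :=
  (PySem.Dict.mk row).getD k d

-- key = (d.get("data_factory_name", ""), d.get("component_name", ""))
def pvDepKey (d : List (String × String)) : String × String :=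
  (pvRowGetD d "data_factory_name" "", pvRowGetD d "component_name" "")

-- parent_name = m["parent_component"].split("/")[0]  (the guard guarantees the key is present,
-- so the subscript is ported as the .get with default "")
def pvParentHead (m : List (String × String)) : String :=
  (((PySem.Str.split? (pvRowGetD m "parent_component" "") "/").getD [])).headD ""

-- the merged.append({...}) dict literal of A
def pvMergedRow (m : List (String × String)) (factory name : String)
    (dep : List (String × String)) : List (String × String) :=
  [("data_factory_name", factory),
   ("adf_component_type", pvRowGetD m "adf_component_type" ""),
   ("adf_component_name", name),
   ("adf_subtype", pvRowGetD m "adf_subtype" ""),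
   ("parent_component", pvRowGetD m "parent_component" ""),
   ("databricks_equivalent", pvRowGetD m "databricks_equivalent" ""),
   ("complexity_score", pvRowGetD m "complexity_score" "Low"),
   ("adf_config_summary", pvRowGetD m "adf_config_summary" ""),
   ("key_metrics", pvRowGetD m "key_metrics" "{}"),
   ("migration_phase", pvRowGetD dep "migration_phase" ""),
   ("migration_unit_id", pvRowGetD dep "migration_unit_id" ""),
   ("migration_unit_name", pvRowGetD dep "migration_unit_name" ""),
   ("depends_on", pvRowGetD dep "depends_on" ""),
   ("depended_on_by", pvRowGetD dep "depended_on_by" ""),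
   ("migration_unit_phase_plan", pvRowGetD dep "migration_unit_phase_plan" "")]

def merge_component_data (mapping_rows : List (List (String × String))) (dep_rows : List (List (String × String))) : List (List (String × String)) :=
  -- dep_index = {}; for d in dep_rows: dep_index[key] = d
  let dep_index : PySem.Dict (String × String) (List (String × String)) :=
    dep_rows.foldl (fun idx d => idx.insert (pvDepKey d) d) PySem.Dict.empty
  -- merged = []; for m in mapping_rows: ... merged.append({...})
  mapping_rows.foldl (fun merged m =>
    let factory := pvRowGetD m "data_factory_name" ""
    let name := pvRowGetD m "adf_component_name" ""
    let dep := dep_index.getD (factory, name) []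
    -- if not dep and m.get("parent_component", ""): dep = dep_index.get((factory, parent_name), {})
    let dep := if dep = [] ∧ pvRowGetD m "parent_component" "" ≠ "" then
        dep_index.getD (factory, pvParentHead m) []
      else dep
    merged ++ [pvMergedRow m factory name dep]) []

-- ===== PORT B =====

-- the merged.append({...}) dict literal of B (all fields written with m.get / dep.get directly)
def pvOutRow (m dep : List (String × String)) : List (String × String) :=
  [("data_factory_name", pvRowGetD m "data_factory_name" ""),
   ("adf_component_type", pvRowGetD m "adf_component_type" ""),
   ("adf_component_name", pvRowGetD m "adf_component_name" ""),
   ("adf_subtype", pvRowGetD m "adf_subtype" ""),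
   ("parent_component", pvRowGetD m "parent_component" ""),
   ("databricks_equivalent", pvRowGetD m "databricks_equivalent" ""),
   ("complexity_score", pvRowGetD m "complexity_score" "Low"),
   ("adf_config_summary", pvRowGetD m "adf_config_summary" ""),
   ("key_metrics", pvRowGetD m "key_metrics" "{}"),
   ("migration_phase", pvRowGetD dep "migration_phase" ""),
   ("migration_unit_id", pvRowGetD dep "migration_unit_id" ""),
   ("migration_unit_name", pvRowGetD dep "migration_unit_name" ""),
   ("depends_on", pvRowGetD dep "depends_on" ""),
   ("depended_on_by", pvRowGetD dep "depended_on_by" ""),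
   ("migration_unit_phase_plan", pvRowGetD dep "migration_unit_phase_plan" "")]

def merge_component_data_alt (mapping_rows : List (List (String × String))) (dep_rows : List (List (String × String))) : List (List (String × String)) :=
  -- for i, m in enumerate(mapping_rows): register i under its direct key (and parent key, if any)
  let enum := PySem.List.enumerate mapping_rows
  let direct_want : PySem.Dict (String × String) (List Int) :=
    enum.foldl (fun w p =>
      w.modify (pvRowGetD p.2 "data_factory_name" "", pvRowGetD p.2 "adf_component_name" "") [] (· ++ [p.1]))
      PySem.Dict.empty
  let parent_want : PySem.Dict (String × String) (List Int) :=
    enum.foldl (fun w p =>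
      if pvRowGetD p.2 "parent_component" "" ≠ "" then
        w.modify (pvRowGetD p.2 "data_factory_name" "", pvParentHead p.2) [] (· ++ [p.1])
      else w)
      PySem.Dict.empty
  -- for d in dep_rows: deliver d to every subscriber of its key
  let hits :=
    dep_rows.foldl
      (fun (h : PySem.Dict Int (List (String × String)) × PySem.Dict Int (List (String × String))) d =>
        let key := (pvRowGetD d "data_factory_name" "", pvRowGetD d "component_name" "")
        ((direct_want.getD key []).foldl (fun h1 i => h1.insert i d) h.1,
         (parent_want.getD key []).foldl (fun h2 i => h2.insert i d) h.2))
      (PySem.Dict.empty, PySem.Dict.empty)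
  -- merged = []; for i, m in enumerate(mapping_rows): ...
  enum.foldl (fun merged p =>
    let dep := hits.1.getD p.1 []
    let dep := if dep = [] ∧ pvRowGetD p.2 "parent_component" "" ≠ "" then hits.2.getD p.1 [] else dep
    merged ++ [pvOutRow p.2 dep]) []

-- ===== PRECONDITION & SPEC =====
def Spec_merge_component_data (mapping_rows : List (List (String × String))) (dep_rows : List (List (String × String))) (out : List (List (String × String))) : Prop := out = merge_component_data_alt mapping_rows dep_rows
instance (mapping_rows : List (List (String × String))) (dep_rows : List (List (String × String))) (out : List (List (String × String))) : Decidable (Spec_merge_component_data mapping_rows dep_rows out) := by unfold Spec_merge_component_data; infer_instance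

-- ===== CLAIM (what is proved, stated in full; the proofs are below) =====
def Claim_equal_merge_component_data : Prop := ∀ (mapping_rows : List (List (String × String))) (dep_rows : List (List (String × String))), Dom_merge_component_data mapping_rows dep_rows → Spec_merge_component_data mapping_rows dep_rows (merge_component_data mapping_rows dep_rows)

-- ===== LEMMAS AND PROOFS =====

-- mapping-row keys used throughout the proofs
def pvKeyM (m : List (String × String)) : String × String :=
  (pvRowGetD m "data_factory_name" "", pvRowGetD m "adf_component_name" "")
def pvKeyP (m : List (String × String)) : String × String :=
  (pvRowGetD m "data_factory_name" "", pvParentHead m)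

theorem pvDepKey_def (d : List (String × String)) :
    (pvRowGetD d "data_factory_name" "", pvRowGetD d "component_name" "") = pvDepKey d := rfl
theorem pvKeyM_def (m : List (String × String)) :
    (pvRowGetD m "data_factory_name" "", pvRowGetD m "adf_component_name" "") = pvKeyM m := rfl
theorem pvKeyP_def (m : List (String × String)) :
    (pvRowGetD m "data_factory_name" "", pvParentHead m) = pvKeyP m := rfl

-- the last dep row whose key equals k (the value A's dict lookup yields), as a fold
def pvLast (dep_rows : List (List (String × String))) (k : String × String)
    (init : List (String × String)) : List (String × String) :=
  dep_rows.foldl (fun dep d => if pvDepKey d = k then d else dep) init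

-- the dep row both programs resolve for a mapping row m
def pvResolve (dep_rows : List (List (String × String))) (m : List (String × String)) :
    List (String × String) :=
  let dep := pvLast dep_rows (pvKeyM m) []
  if dep = [] ∧ pvRowGetD m "parent_component" "" ≠ "" then pvLast dep_rows (pvKeyP m) [] else dep

-- A's dict lookup = last matching row
theorem pv_getD_fold_insert (l : List (List (String × String)))
    (idx : PySem.Dict (String × String) (List (String × String))) (k : String × String) :
    (l.foldl (fun idx d => idx.insert (pvDepKey d) d) idx).getD k [] =
      pvLast l k (idx.getD k []) := by
  induction l generalizing idx with
  | nil => rfl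
  | cons d l ih =>
      simp only [pvLast, List.foldl_cons] at *
      rw [ih]
      congr 1
      rw [PySem.Dict.getD_insert]
      by_cases h : pvDepKey d = k
      · simp [h]
      · simp [h, Ne.symm h]

-- an enumerate index determines its row
theorem pv_enum_inj {xs : List (List (String × String))} {i : Int} {m m' : List (String × String)}
    (h : (i, m) ∈ PySem.List.enumerate xs) (h' : (i, m') ∈ PySem.List.enumerate xs) : m = m' := by
  rw [PySem.List.mem_enumerate_iff] at h h'
  obtain ⟨k, hk, he⟩ := h
  obtain ⟨k', hk', he'⟩ := h'
  obtain ⟨hi, hm⟩ := Prod.mk.injEq .. ▸ he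
  obtain ⟨hi', hm'⟩ := Prod.mk.injEq .. ▸ he'
  have : k = k' := by omega
  subst this; rw [hm, hm']

-- the direct_want lists: i subscribes to k iff k is the direct key of row i
theorem pv_mem_direct_want (xs : List (List (String × String))) (k : String × String) (i : Int) :
    i ∈ ((PySem.List.enumerate xs).foldl (fun w p => w.modify (pvKeyM p.2) [] (· ++ [p.1]))
        (PySem.Dict.empty : PySem.Dict (String × String) (List Int))).getD k [] ↔
      ∃ m, (i, m) ∈ PySem.List.enumerate xs ∧ pvKeyM m = k := by
  rw [show ((PySem.List.enumerate xs).foldl (fun w p => w.modify (pvKeyM p.2) [] (· ++ [p.1]))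
        (PySem.Dict.empty : PySem.Dict (String × String) (List Int)))
      = (((PySem.List.enumerate xs).map (fun p => (pvKeyM p.2, p.1))).foldl
          (fun w q => w.modify q.1 [] (· ++ [q.2])) PySem.Dict.empty) from
    (List.foldl_map (f := fun p : Int × List (String × String) => (pvKeyM p.2, p.1))
      (g := fun (w : PySem.Dict (String × String) (List Int)) q => w.modify q.1 [] (· ++ [q.2]))).symm]
  rw [PySem.Dict.getD_foldl_modify_append]
  simp only [PySem.Dict.getD_empty, List.nil_append, List.filter_map, List.map_map, List.mem_map,
    List.mem_filter, Function.comp]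
  constructor
  · rintro ⟨p, ⟨hp, hk⟩, rfl⟩
    exact ⟨p.2, hp, by simpa using hk⟩
  · rintro ⟨m, hm, hk⟩
    exact ⟨(i, m), ⟨hm, by simpa using hk⟩, rfl⟩

-- the parent_want lists: i subscribes to k iff row i has a parent and k is its parent key
theorem pv_mem_parent_want (xs : List (List (String × String))) (k : String × String) (i : Int) :
    i ∈ ((PySem.List.enumerate xs).foldl (fun w p =>
          if pvRowGetD p.2 "parent_component" "" ≠ "" then w.modify (pvKeyP p.2) [] (· ++ [p.1]) else w)
        (PySem.Dict.empty : PySem.Dict (String × String) (List Int))).getD k [] ↔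
      ∃ m, (i, m) ∈ PySem.List.enumerate xs ∧ pvRowGetD m "parent_component" "" ≠ "" ∧ pvKeyP m = k := by
  rw [PySem.List.foldl_ite_eq_foldl_filter]
  rw [show (((PySem.List.enumerate xs).filter fun p => decide (pvRowGetD p.2 "parent_component" "" ≠ "")).foldl
        (fun w p => w.modify (pvKeyP p.2) [] (· ++ [p.1]))
        (PySem.Dict.empty : PySem.Dict (String × String) (List Int)))
      = ((((PySem.List.enumerate xs).filter fun p => decide (pvRowGetD p.2 "parent_component" "" ≠ "")).map
            (fun p => (pvKeyP p.2, p.1))).foldl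
          (fun w q => w.modify q.1 [] (· ++ [q.2])) PySem.Dict.empty) from
    (List.foldl_map (f := fun p : Int × List (String × String) => (pvKeyP p.2, p.1))
      (g := fun (w : PySem.Dict (String × String) (List Int)) q => w.modify q.1 [] (· ++ [q.2]))).symm]
  rw [PySem.Dict.getD_foldl_modify_append]
  simp only [PySem.Dict.getD_empty, List.nil_append, List.filter_map, List.map_map, List.mem_map,
    List.mem_filter, Function.comp]
  constructor
  · rintro ⟨p, ⟨⟨hp, hpar⟩, hk⟩, rfl⟩
    refine ⟨p.2, hp, by simpa using hpar, by simpa using hk⟩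
  · rintro ⟨m, hm, hpar, hk⟩
    exact ⟨(i, m), ⟨⟨hm, by simpa using hpar⟩, by simpa using hk⟩, rfl⟩

-- delivering v to every index in is: lookup at j afterwards
theorem pv_getD_fold_insert_idx (is : List Int) (v : List (String × String))
    (h : PySem.Dict Int (List (String × String))) (j : Int) :
    (is.foldl (fun h i => h.insert i v) h).getD j [] = if j ∈ is then v else h.getD j [] := by
  induction is generalizing h with
  | nil => simp
  | cons a is ih =>
      simp only [List.foldl_cons, ih, PySem.Dict.getD_insert, List.mem_cons]
      by_cases hj : j ∈ is
      · simp [hj]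
      · by_cases ha : j = a <;> simp [hj, ha]

-- the scatter pass, read back at subscriber i: exactly the last matching dep row
theorem pv_hit_getD (dep_rows : List (List (String × String)))
    (W : PySem.Dict (String × String) (List Int))
    (h0 : PySem.Dict Int (List (String × String))) (i : Int) (k : String × String)
    (hW : ∀ k', i ∈ W.getD k' [] ↔ k = k') :
    (dep_rows.foldl (fun h d => (W.getD (pvDepKey d) []).foldl (fun h1 j => h1.insert j d) h) h0).getD i []
      = pvLast dep_rows k (h0.getD i []) := by
  induction dep_rows generalizing h0 with
  | nil => rfl
  | cons d l ih =>
      simp only [pvLast, List.foldl_cons] at *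
      rw [ih, pv_getD_fold_insert_idx]
      congr 1
      by_cases h : pvDepKey d = k
      · have hm : i ∈ W.getD (pvDepKey d) [] := (hW _).mpr h.symm
        rw [if_pos hm, if_pos h]
      · have hm : i ∉ W.getD (pvDepKey d) [] := fun hm => h ((hW _).mp hm).symm
        rw [if_neg hm, if_neg h]

-- A computes, row by row, the resolved dep
theorem pv_A_eq (mapping_rows dep_rows : List (List (String × String))) :
    merge_component_data mapping_rows dep_rows
      = mapping_rows.map (fun m => pvOutRow m (pvResolve dep_rows m)) := by
  unfold merge_component_data
  rw [PySem.List.foldl_append_singleton_eq_map]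
  simp only [List.nil_append]
  refine List.map_congr_left (fun m _ => ?_)
  simp only [pvKeyM_def, pvKeyP_def, pv_getD_fold_insert, PySem.Dict.getD_empty, pvResolve]
  rfl

-- the scatter fold with a pair of accumulators is two independent folds
theorem pv_split (Wd Wp : PySem.Dict (String × String) (List Int))
    (dr : List (List (String × String))) :
    dr.foldl (fun (h : PySem.Dict Int (List (String × String)) × PySem.Dict Int (List (String × String))) d =>
        ((Wd.getD (pvDepKey d) []).foldl (fun h1 j => h1.insert j d) h.1,
         (Wp.getD (pvDepKey d) []).foldl (fun h2 j => h2.insert j d) h.2))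
      (PySem.Dict.empty, PySem.Dict.empty)
    = (dr.foldl (fun h d => (Wd.getD (pvDepKey d) []).foldl (fun h1 j => h1.insert j d) h) PySem.Dict.empty,
       dr.foldl (fun h d => (Wp.getD (pvDepKey d) []).foldl (fun h2 j => h2.insert j d) h) PySem.Dict.empty) :=
  PySem.List.foldl_prod_mk
    (fun h d => (Wd.getD (pvDepKey d) []).foldl (fun h1 j => h1.insert j d) h)
    (fun h d => (Wp.getD (pvDepKey d) []).foldl (fun h2 j => h2.insert j d) h)
    dr PySem.Dict.empty PySem.Dict.empty

-- B computes, row by row, the same resolved dep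
theorem pv_B_eq (mapping_rows dep_rows : List (List (String × String))) :
    merge_component_data_alt mapping_rows dep_rows
      = mapping_rows.map (fun m => pvOutRow m (pvResolve dep_rows m)) := by
  unfold merge_component_data_alt
  rw [PySem.List.foldl_append_singleton_eq_map]
  simp only [List.nil_append, pvDepKey_def, pvKeyM_def, pvKeyP_def, pv_split]
  refine Eq.trans (List.map_congr_left
    (g := fun p : Int × List (String × String) => pvOutRow p.2 (pvResolve dep_rows p.2)) ?_) ?_
  · rintro ⟨i, m⟩ hp
    dsimp only
    have hWd : ∀ k', i ∈ ((PySem.List.enumerate mapping_rows).foldl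
        (fun w p => w.modify (pvKeyM p.2) [] (· ++ [p.1]))
        (PySem.Dict.empty : PySem.Dict (String × String) (List Int))).getD k' [] ↔ pvKeyM m = k' := by
      intro k'
      rw [pv_mem_direct_want]
      constructor
      · rintro ⟨m', hm', hk⟩; rwa [pv_enum_inj hm' hp] at hk
      · intro h; exact ⟨m, hp, h⟩
    have h1 : (dep_rows.foldl (fun h d => (((PySem.List.enumerate mapping_rows).foldl
          (fun w p => w.modify (pvKeyM p.2) [] (· ++ [p.1])) PySem.Dict.empty).getD (pvDepKey d) []).foldl
            (fun h1 j => h1.insert j d) h) PySem.Dict.empty).getD i []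
        = pvLast dep_rows (pvKeyM m) [] := by
      rw [pv_hit_getD dep_rows _ _ i (pvKeyM m) hWd, PySem.Dict.getD_empty]
    have h2 : pvRowGetD m "parent_component" "" ≠ "" →
        (dep_rows.foldl (fun h d => (((PySem.List.enumerate mapping_rows).foldl
          (fun w p => if pvRowGetD p.2 "parent_component" "" ≠ "" then w.modify (pvKeyP p.2) [] (· ++ [p.1]) else w)
          PySem.Dict.empty).getD (pvDepKey d) []).foldl (fun h2 j => h2.insert j d) h) PySem.Dict.empty).getD i []
        = pvLast dep_rows (pvKeyP m) [] := by
      intro hpar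
      have hWp : ∀ k', i ∈ ((PySem.List.enumerate mapping_rows).foldl (fun w p =>
            if pvRowGetD p.2 "parent_component" "" ≠ "" then w.modify (pvKeyP p.2) [] (· ++ [p.1]) else w)
          (PySem.Dict.empty : PySem.Dict (String × String) (List Int))).getD k' [] ↔ pvKeyP m = k' := by
        intro k'
        rw [pv_mem_parent_want]
        constructor
        · rintro ⟨m', hm', _, hk⟩; rwa [pv_enum_inj hm' hp] at hk
        · intro h; exact ⟨m, hp, hpar, h⟩
      rw [pv_hit_getD dep_rows _ _ i (pvKeyP m) hWp, PySem.Dict.getD_empty]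
    rw [h1]
    simp only [pvResolve]
    split_ifs with hc
    · rw [h2 hc.2]
    · rfl
  · rw [show (fun p : Int × List (String × String) => pvOutRow p.2 (pvResolve dep_rows p.2))
        = (fun m => pvOutRow m (pvResolve dep_rows m)) ∘ (fun p : Int × List (String × String) => p.2) from rfl,
      ← List.map_map, PySem.List.map_snd_enumerate]

-- ===== VERDICT (by name: the statement is the Claim_ definition above) =====
theorem merge_component_data_spec : Claim_equal_merge_component_data := by
  intro mapping_rows dep_rows _
  unfold Spec_merge_component_data
  rw [pv_A_eq, pv_B_eq]
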